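-- pv_equiv track=rewrite | github.com/philipdaubmeier/pixelpast-core | src/pixelpast/ingestion/lightroom_catalog/transform.py | _expand_hierarchy_paths
-- ===== SOURCE A (Python) =====
-- _HIERARCHY_SEPARATOR = "|"
--
-- def _expand_hierarchy_paths(paths: tuple[str, ...]) -> tuple[str, ...]:
--     expanded_paths: list[str] = []
--     seen: set[str] = set()
--     for path in paths:
--         segments = path.split(_HIERARCHY_SEPARATOR)
--         for index in range(1, len(segments) + 1):
--             candidate = _HIERARCHY_SEPARATOR.join(segments[:index])
--             if candidate in seen:
--                 continue
--             seen.add(candidate)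
--             expanded_paths.append(candidate)
--     return tuple(expanded_paths)
-- ===== SOURCE B (Python) =====
-- _HIERARCHY_SEPARATOR = "|"
--
-- def _expand_hierarchy_paths(paths: tuple[str, ...]) -> tuple[str, ...]:
--     # Single left-to-right character scan per path: emit the running prefix at
--     # every separator and the full path at the end; no split/slice/join rebuilds.
--     expanded_paths: list[str] = []
--     seen: set[str] = set()
--     for path in paths:
--         buf: list[str] = []
--         for ch in path:
--             if ch == _HIERARCHY_SEPARATOR:
--                 prefix = "".join(buf)
--                 if prefix not in seen:
--                     seen.add(prefix)
--                     expanded_paths.append(prefix)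
--             buf.append(ch)
--         if path not in seen:
--             seen.add(path)
--             expanded_paths.append(path)
--     return tuple(expanded_paths)
-- ===== Notes on version B (the rewrite author's own statement) =====
-- stated objective: faster
-- what changed: A splits each path into segments and rebuilds every prefix with a join over a growing slice (quadratic per path); B makes one left-to-right character scan per path, emitting the running prefix at each separator and the full path at the end, with the same first-seen dedup set.
import Mathlib
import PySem

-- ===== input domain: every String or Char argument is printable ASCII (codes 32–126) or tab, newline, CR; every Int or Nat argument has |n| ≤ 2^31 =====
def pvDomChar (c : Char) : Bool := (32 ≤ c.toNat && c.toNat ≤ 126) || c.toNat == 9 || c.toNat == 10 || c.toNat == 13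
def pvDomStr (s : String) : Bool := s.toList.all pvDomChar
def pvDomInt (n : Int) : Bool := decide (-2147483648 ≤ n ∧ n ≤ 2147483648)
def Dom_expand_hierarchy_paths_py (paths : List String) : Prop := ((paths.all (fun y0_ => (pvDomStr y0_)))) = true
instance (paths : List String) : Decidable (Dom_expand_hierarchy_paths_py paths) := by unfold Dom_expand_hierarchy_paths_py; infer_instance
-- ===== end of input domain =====

-- B replaces A's nested prefix-rebuild (split, then join each slice) by one character scan
-- per path that emits the running prefix at each separator; same return value, alternative algorithm.

-- ===== PORT A =====
def expand_hierarchy_paths_py (paths : List String) : List String :=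
  (paths.foldl
    (fun (st : List String × PySem.Set String) path =>
      let segments := (PySem.Chars.splitOn path.toList ['|']).map String.ofList
      (PySem.List.pyRange 1 ((segments.length : Int) + 1) 1).foldl
        (fun (st : List String × PySem.Set String) index =>
          let candidate := PySem.Str.join "|" (PySem.List.slice segments none (some index))
          if st.2.contains candidate then st
          else (st.1 ++ [candidate], st.2.add candidate))
        st)
    (([] : List String), (PySem.Set.empty : PySem.Set String))).1

-- ===== PORT B =====
def expand_hierarchy_paths_py_alt (paths : List String) : List String :=
  (paths.foldl
    (fun (st : List String × PySem.Set String) path =>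
      let p := path.toList.foldl
        (fun (p : (List String × PySem.Set String) × List Char) ch =>
          let st := p.1
          let st' :=
            if ch == '|' then
              let pre := String.ofList p.2
              if st.2.contains pre then st else (st.1 ++ [pre], st.2.add pre)
            else st
          (st', p.2 ++ [ch]))
        (st, ([] : List Char))
      let st2 := p.1
      if st2.2.contains path then st2 else (st2.1 ++ [path], st2.2.add path))
    (([] : List String), (PySem.Set.empty : PySem.Set String))).1

-- ===== PRECONDITION & SPEC =====
def Spec_expand_hierarchy_paths_py (paths : List String) (out : List String) : Prop := out = expand_hierarchy_paths_py_alt paths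
instance (paths : List String) (out : List String) : Decidable (Spec_expand_hierarchy_paths_py paths out) := by unfold Spec_expand_hierarchy_paths_py; infer_instance

-- ===== CLAIM (what is proved, stated in full; the proofs are below) =====
def Claim_equal_expand_hierarchy_paths_py : Prop := ∀ (paths : List String), Dom_expand_hierarchy_paths_py paths → Spec_expand_hierarchy_paths_py paths (expand_hierarchy_paths_py paths)

-- ===== LEMMAS AND PROOFS =====

-- the common dedup step both inner loops perform on one candidate string
def pvStep (st : List String × PySem.Set String) (c : String) : List String × PySem.Set String :=
  if st.2.contains c then st else (st.1 ++ [c], st.2.add c)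

-- prefixes B emits while scanning `cs` with current running prefix `buf`
def pvEmits : List Char → List Char → List (List Char)
  | _, [] => []
  | buf, c :: rs => (if c = '|' then [buf] else []) ++ pvEmits (buf ++ [c]) rs

-- accumulator-free form of PySem.Chars.splitOn on the one-char separator '|'
def pvSplitAux : List Char → List Char → List (List Char)
  | [], cur => [cur.reverse]
  | c :: rest, cur => if c = '|' then cur.reverse :: pvSplitAux rest [] else pvSplitAux rest (c :: cur)

lemma pvGo_eq : ∀ (fuel : Nat) (l cur : List Char) (acc : List (List Char)), l.length ≤ fuel →
    PySem.Chars.splitOn.go ['|'] fuel l cur acc = acc.reverse ++ pvSplitAux l cur := by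
  intro fuel
  induction fuel with
  | zero =>
    intro l cur acc h
    have : l = [] := List.eq_nil_of_length_eq_zero (Nat.le_zero.mp h)
    subst this
    simp [PySem.Chars.splitOn.go, pvSplitAux]
  | succ n ih =>
    intro l cur acc h
    cases l with
    | nil => simp [PySem.Chars.splitOn.go, pvSplitAux]
    | cons c rest =>
      simp only [PySem.Chars.splitOn.go]
      by_cases hc : c = '|'
      · subst hc
        rw [if_pos (by simp [List.isPrefixOf])]
        simp only [List.length_cons] at h
        rw [ih _ _ _ (by simpa using Nat.lt_succ_iff.mp (Nat.lt_of_lt_of_le (Nat.lt_succ_of_le (Nat.le_of_succ_le_succ h)) (le_refl _)))]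
        simp [pvSplitAux]
      · rw [if_neg (by simp [List.isPrefixOf]; exact fun h => hc h.symm)]
        simp only [List.length_cons] at h
        rw [ih _ _ _ (Nat.le_of_succ_le_succ h)]
        simp [pvSplitAux, hc]

lemma pvSplitOn_eq (cs : List Char) : PySem.Chars.splitOn cs ['|'] = pvSplitAux cs [] := by
  unfold PySem.Chars.splitOn
  rw [pvGo_eq (cs.length + 1) cs [] [] (Nat.le_succ _)]
  simp

lemma pvSplitAux_ne_nil (cs : List Char) : ∀ cur, pvSplitAux cs cur ≠ [] := by
  induction cs with
  | nil => intro cur; simp [pvSplitAux]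
  | cons c rs ih =>
    intro cur
    by_cases hc : c = '|' <;> simp [pvSplitAux, hc, ih]

lemma pvJoin_cons_ne (sep p : List Char) (rest : List (List Char)) (h : rest ≠ []) :
    PySem.Chars.join sep (p :: rest) = p ++ sep ++ PySem.Chars.join sep rest := by
  cases rest with
  | nil => exact absurd rfl h
  | cons q t => exact PySem.Chars.join_cons_cons sep p q t

lemma pvEmits_append (p : List Char) (cs : List Char) : ∀ b,
    pvEmits (p ++ b) cs = (pvEmits b cs).map (p ++ ·) := by
  induction cs with
  | nil => intro b; simp [pvEmits]
  | cons c rs ih =>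
    intro b
    simp only [pvEmits]
    rw [show p ++ b ++ [c] = p ++ (b ++ [c]) by simp, ih (b ++ [c])]
    by_cases hc : c = '|' <;> simp [hc]

lemma pvCands_eq (cs : List Char) : ∀ pre : List Char,
    (List.range (pvSplitAux cs pre).length).map
        (fun k => PySem.Chars.join ['|'] ((pvSplitAux cs pre).take (k + 1)))
      = pvEmits pre.reverse cs ++ [pre.reverse ++ cs] := by
  induction cs with
  | nil =>
    intro pre
    simp [pvSplitAux, pvEmits, PySem.Chars.join_singleton]
  | cons c rs ih =>
    intro pre
    by_cases hc : c = '|'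
    · subst hc
      simp only [pvSplitAux, if_true, List.length_cons]
      rw [List.range_succ_eq_map]
      simp only [List.map_cons, List.map_map]
      have htake : ∀ k, (pre.reverse :: pvSplitAux rs []).take (k + 1 + 1)
          = pre.reverse :: (pvSplitAux rs []).take (k + 1) := by
        intro k; simp [List.take_succ_cons]
      have hjoin : ∀ k, PySem.Chars.join ['|'] ((pre.reverse :: pvSplitAux rs []).take (k + 1 + 1))
          = (pre.reverse ++ ['|']) ++ PySem.Chars.join ['|'] ((pvSplitAux rs []).take (k + 1)) := by
        intro k
        rw [htake k, pvJoin_cons_ne _ _ _ (by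
          have := pvSplitAux_ne_nil rs []
          cases h : pvSplitAux rs [] with
          | nil => exact absurd h this
          | cons a t => simp [List.take_succ_cons])]
      have hmap : (List.range (pvSplitAux rs []).length).map
            ((fun k => PySem.Chars.join ['|'] ((pre.reverse :: pvSplitAux rs []).take (k + 1))) ∘ (· + 1))
          = ((List.range (pvSplitAux rs []).length).map
              (fun k => PySem.Chars.join ['|'] ((pvSplitAux rs []).take (k + 1)))).map
              ((pre.reverse ++ ['|']) ++ ·) := by
        rw [List.map_map]
        apply List.map_congr_left
        intro k _
        simpa using hjoin k
      rw [hmap, ih []]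
      simp only [pvEmits, List.reverse_nil]
      rw [show pre.reverse ++ ['|'] = pre.reverse ++ ['|'] ++ [] by simp] 
      rw [pvEmits_append (pre.reverse ++ ['|']) rs []]
      simp [PySem.Chars.join_singleton, List.take_succ_cons]
    · simp only [pvSplitAux, if_neg hc]
      rw [ih (c :: pre)]
      simp [pvEmits, hc]

-- B's character loop, characterised
lemma pvBLoop (cs : List Char) : ∀ (buf : List Char) (st : List String × PySem.Set String),
    cs.foldl
        (fun (p : (List String × PySem.Set String) × List Char) ch =>
          (if ch == '|' then pvStep p.1 (String.ofList p.2) else p.1, p.2 ++ [ch]))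
        (st, buf)
      = (List.foldl pvStep st ((pvEmits buf cs).map String.ofList), buf ++ cs) := by
  induction cs with
  | nil => intro buf st; simp [pvEmits]
  | cons c rs ih =>
    intro buf st
    simp only [List.foldl_cons, pvEmits]
    rw [ih (buf ++ [c])]
    by_cases hc : c = '|' <;> simp [hc]


-- the candidate list both ports deduplicate, per path
def pvCands (cs : List Char) : List String :=
  (pvEmits [] cs ++ [cs]).map String.ofList

lemma pvAInner (st : List String × PySem.Set String) (path : String) :
    (PySem.List.pyRange 1 ((((PySem.Chars.splitOn path.toList ['|']).map String.ofList).length : Int) + 1) 1).foldl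
        (fun (st : List String × PySem.Set String) index =>
          let candidate := PySem.Str.join "|"
            (PySem.List.slice ((PySem.Chars.splitOn path.toList ['|']).map String.ofList) none (some index))
          if st.2.contains candidate then st
          else (st.1 ++ [candidate], st.2.add candidate)) st
      = List.foldl pvStep st (pvCands path.toList) := by
  rw [pvSplitOn_eq]
  set S := pvSplitAux path.toList [] with hS
  have hlen : (((S.map String.ofList).length : Int) + 1 - 1).toNat = S.length := by simp
  rw [PySem.List.pyRange_one, hlen, List.foldl_map]
  have hcand : ∀ k : Nat, PySem.Str.join "|"
      (PySem.List.slice (S.map String.ofList) none (some (1 + (k : Int))))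
      = String.ofList (PySem.Chars.join ['|'] (S.take (k + 1))) := by
    intro k
    have h1 : (1 : Int) + (k : Int) = ((k + 1 : Nat) : Int) := by push_cast; ring
    rw [h1, PySem.List.slice_to_natCast, ← List.map_take]
    simp [PySem.Str.join, Function.comp_def]
  have hfun : (fun (st : List String × PySem.Set String) (k : Nat) =>
        let candidate := PySem.Str.join "|"
          (PySem.List.slice (S.map String.ofList) none (some (1 + (k : Int))))
        if st.2.contains candidate then st
        else (st.1 ++ [candidate], st.2.add candidate))
      = (fun st k => pvStep st (String.ofList (PySem.Chars.join ['|'] (S.take (k + 1))))) := by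
    funext s k
    simp only [hcand k, pvStep]
  have h := pvCands_eq path.toList []
  simp only [List.reverse_nil, List.nil_append] at h
  rw [hfun, ← List.foldl_map, pvCands, ← h, List.map_map]
  rfl

lemma pvBInner (st : List String × PySem.Set String) (path : String) :
    (let p := path.toList.foldl
        (fun (p : (List String × PySem.Set String) × List Char) ch =>
          let st := p.1
          let st' :=
            if ch == '|' then
              let pre := String.ofList p.2
              if st.2.contains pre then st else (st.1 ++ [pre], st.2.add pre)
            else st
          (st', p.2 ++ [ch]))
        (st, ([] : List Char))
      let st2 := p.1
      if st2.2.contains path then st2 else (st2.1 ++ [path], st2.2.add path))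
      = List.foldl pvStep st (pvCands path.toList) := by
  have hloop : path.toList.foldl
        (fun (p : (List String × PySem.Set String) × List Char) ch =>
          (if ch == '|' then pvStep p.1 (String.ofList p.2) else p.1, p.2 ++ [ch]))
        (st, ([] : List Char))
      = (List.foldl pvStep st ((pvEmits [] path.toList).map String.ofList), [] ++ path.toList) :=
    pvBLoop path.toList [] st
  show (if ((path.toList.foldl _ (st, ([] : List Char))).1 : List String × PySem.Set String).2.contains path then _ else _) = _
  have heq : (fun (p : (List String × PySem.Set String) × List Char) (ch : Char) =>
        (if ch == '|' then pvStep p.1 (String.ofList p.2) else p.1, p.2 ++ [ch]))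
      = (fun (p : (List String × PySem.Set String) × List Char) ch =>
          let st := p.1
          let st' :=
            if ch == '|' then
              let pre := String.ofList p.2
              if st.2.contains pre then st else (st.1 ++ [pre], st.2.add pre)
            else st
          (st', p.2 ++ [ch])) := by
    funext p ch
    simp only [pvStep]
  rw [← heq, hloop]
  simp only [pvCands, List.map_append, List.map_cons, List.map_nil, List.foldl_append,
    List.foldl_cons, List.foldl_nil, String.ofList_toList]
  rfl

theorem expand_hierarchy_paths_py_spec : Claim_equal_expand_hierarchy_paths_py := by
  intro paths _
  unfold Spec_expand_hierarchy_paths_py expand_hierarchy_paths_py expand_hierarchy_paths_py_alt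
  congr 2
  funext st path
  exact (pvAInner st path).trans (pvBInner st path).symm
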